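-- pv_equiv track=rewrite | github.com/utibe-47/Infinity | exercises/lgim/exercise_three.py | find_increasing_sub_list
-- ===== SOURCE A (Python) =====
-- from copy import deepcopy
--
-- def input_string_generator(input_data: list):
--     for _string in input_data:
--         yield _string
--
-- def find_increasing_sub_list(input_data: list) -> list:
--
--     input_size = len(input_data)
--     if input_size < 2:
--         return input_data
--
--     previous_string = input_data[0]
--     primary_output = [previous_string]
--     output_dict = {}
--
--     for current_string in input_string_generator(input_data):
--         if len(current_string) > len(previous_string):
--             primary_output.append(current_string)
--             previous_string = current_string
--             if len(output_dict) > 0 and len(output_dict['primary_seq']) < len(primary_output):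
--                 output_dict['primary_seq'] = primary_output
--         else:
--             previous_string = current_string
--             if len(output_dict) == 0:
--                 output_dict['primary_seq'] = deepcopy(primary_output)
--                 primary_output = [previous_string]
--             else:
--                 saved_seq = output_dict['primary_seq']
--                 if len(saved_seq) < len(primary_output):
--                     output_dict['primary_seq'] = primary_output
--                 primary_output = [previous_string]
--
--     if len(output_dict) > 0:
--         return output_dict['primary_seq']
--     else:
--         return primary_output
-- ===== SOURCE B (Python) =====
-- def find_increasing_sub_list(input_data: list) -> list:
--     if len(input_data) < 2:
--         return input_data
--     runs = []
--     current = [input_data[0]]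
--     for s in input_data[1:]:
--         if len(s) > len(current[-1]):
--             current.append(s)
--         else:
--             runs.append(current)
--             current = [s]
--     runs.append(current)
--     best = runs[0]
--     for r in runs[1:]:
--         if len(r) > len(best):
--             best = r
--     return best
-- ===== Notes on version B (the rewrite author's own statement) =====
-- stated objective: simpler
-- what changed: Replaced A's single-key dict bookkeeping with aliasing-dependent in-loop best updates (and its quirky re-scan of element 0) by a plain two-pass scheme: split the list into maximal strictly-increasing-length runs, then pick the first longest run.
import Mathlib
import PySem

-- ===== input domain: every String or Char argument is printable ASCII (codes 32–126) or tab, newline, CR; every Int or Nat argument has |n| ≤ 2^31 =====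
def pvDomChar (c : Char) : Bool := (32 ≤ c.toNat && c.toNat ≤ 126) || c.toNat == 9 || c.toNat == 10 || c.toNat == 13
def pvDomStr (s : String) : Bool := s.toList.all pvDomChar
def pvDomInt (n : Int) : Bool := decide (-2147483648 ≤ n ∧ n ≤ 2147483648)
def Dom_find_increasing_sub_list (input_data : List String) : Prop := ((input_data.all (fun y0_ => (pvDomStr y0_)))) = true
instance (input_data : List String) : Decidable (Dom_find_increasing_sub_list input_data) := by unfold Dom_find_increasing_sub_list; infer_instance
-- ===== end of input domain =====

-- B replaces A's dict-of-one-key bookkeeping by a plain split-into-runs pass followed by a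
-- first-longest selection pass (objective: simpler; same O(n) cost).

-- ===== PORT A =====
-- one loop step of A's `for current_string in input_string_generator(input_data)` body;
-- state = (previous_string, primary_output, output_dict)
def pvStepA (st : String × List String × PySem.Dict String (List String)) (cur : String) :
    String × List String × PySem.Dict String (List String) :=
  let (prev, primary, d) := st
  if PySem.Str.len cur > PySem.Str.len prev then
    let primary := primary ++ [cur]
    let d :=
      if d.size > 0 ∧ (d.getD "primary_seq" []).length < primary.length then
        d.insert "primary_seq" primary
      else d
    (cur, primary, d)
  else
    if d.size = 0 then
      (cur, [cur], d.insert "primary_seq" primary)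
    else
      let saved := d.getD "primary_seq" []
      let d := if saved.length < primary.length then d.insert "primary_seq" primary else d
      (cur, [cur], d)

def find_increasing_sub_list (input_data : List String) : List String :=
  if input_data.length < 2 then input_data
  else
    match input_data with
    | [] => input_data  -- unreachable: length ≥ 2
    | x0 :: _ =>
      let st := input_data.foldl pvStepA (x0, [x0], PySem.Dict.empty)
      let (_, primary, d) := st
      if d.size > 0 then d.getD "primary_seq" [] else primary

-- ===== PORT B =====
-- one step of B's run-splitting loop; state = (runs, current)
def pvStepB (st : List (List String) × List String) (s : String) :
    List (List String) × List String :=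
  let (runs, current) := st
  if PySem.Str.len s > PySem.Str.len (PySem.List.pyGetD current (-1) "") then
    (runs, current ++ [s])
  else
    (runs ++ [current], [s])

-- B's second pass: first-longest run wins ties
def pvBest (best : List String) (rs : List (List String)) : List String :=
  rs.foldl (fun b r => if r.length > b.length then r else b) best

def find_increasing_sub_list_alt (input_data : List String) : List String :=
  if input_data.length < 2 then input_data
  else
    match input_data with
    | [] => input_data  -- unreachable: length ≥ 2
    | x0 :: rest =>
      let (runs, current) := rest.foldl pvStepB ([], [x0])
      match runs ++ [current] with
      | [] => []  -- unreachable
      | b0 :: rs => pvBest b0 rs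

-- ===== PRECONDITION & SPEC =====
def Spec_find_increasing_sub_list (input_data : List String) (out : List String) : Prop := out = find_increasing_sub_list_alt input_data
instance (input_data : List String) (out : List String) : Decidable (Spec_find_increasing_sub_list input_data out) := by unfold Spec_find_increasing_sub_list; infer_instance

-- ===== CLAIM (what is proved, stated in full; the proofs are below) =====
def Claim_equal_find_increasing_sub_list : Prop := ∀ (input_data : List String), Dom_find_increasing_sub_list input_data → Spec_find_increasing_sub_list input_data (find_increasing_sub_list input_data)

-- ===== LEMMAS AND PROOFS =====

-- the dict A maintains is always {"primary_seq": v} after the first iteration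
def pvD1 (v : List String) : PySem.Dict String (List String) := PySem.Dict.mk [("primary_seq", v)]

-- best run (first longest) of a nonempty list of runs, as B computes it
def pvBestOf (rs : List (List String)) : List String :=
  match rs with
  | [] => []
  | b0 :: t => pvBest b0 t

theorem pvD1_size (v : List String) : (pvD1 v).size = 1 := rfl

theorem pvD1_getD (v : List String) : (pvD1 v).getD "primary_seq" [] = v := rfl

theorem pvD1_insert (v w : List String) :
    (pvD1 v).insert "primary_seq" w = pvD1 w := rfl

theorem pvBest_append (b : List String) (rs : List (List String)) (c : List String) :
    pvBest b (rs ++ [c]) = (if c.length > (pvBest b rs).length then c else pvBest b rs) := by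
  simp [pvBest, List.foldl_append]

theorem pvBestOf_append (rs : List (List String)) (c : List String) (h : rs ≠ []) :
    pvBestOf (rs ++ [c]) = (if c.length > (pvBestOf rs).length then c else pvBestOf rs) := by
  cases rs with
  | nil => exact absurd rfl h
  | cons b0 t => simp [pvBestOf, pvBest_append]

theorem pv_last_get (primary : List String) (h : primary ≠ []) :
    PySem.List.pyGetD primary (-1) "" = primary.getLastD "" := by
  rw [PySem.List.pyGetD_neg_one (h := h)]
  simp [List.getLastD_eq_getLast?, List.getLast?_eq_some_getLast h]

-- extending the current run by one element commutes with taking the first-longest run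
theorem pv_best_grow (rs : List (List String)) (P : List String) (c : String) :
    pvBestOf (rs ++ [P ++ [c]])
      = (if (pvBestOf (rs ++ [P])).length < (P ++ [c]).length
          then P ++ [c] else pvBestOf (rs ++ [P])) := by
  cases rs with
  | nil =>
    simp only [List.nil_append, pvBestOf, pvBest, List.foldl_nil]
    rw [if_pos (show P.length < (P ++ [c]).length by simp)]
  | cons r0 rt =>
    rw [pvBestOf_append _ _ (by simp), pvBestOf_append _ _ (by simp)]
    have h1 : (P ++ [c]).length = P.length + 1 := by simp
    by_cases h : P.length > (pvBestOf (r0 :: rt)).length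
    · rw [if_pos h, if_pos (show (P ++ [c]).length > (pvBestOf (r0 :: rt)).length by omega),
        if_pos (show P.length < (P ++ [c]).length by omega)]
    · rw [if_neg h]

-- the best run is at least as long as the current (last) run
theorem pv_best_ge_last (rs : List (List String)) (P : List String) :
    P.length ≤ (pvBestOf (rs ++ [P])).length := by
  cases rs with
  | nil => simp [pvBestOf, pvBest]
  | cons r0 rt =>
    rw [pvBestOf_append _ _ (by simp)]
    by_cases hc : P.length > (pvBestOf (r0 :: rt)).length
    · rw [if_pos hc]
    · rw [if_neg hc]; omega

-- main loop invariant: A's (previous, primary, dict) state is determined by B's (runs, current)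
theorem pv_loop_eq (l : List String) (primary : List String) (runs : List (List String))
    (hne : primary ≠ []) :
    l.foldl pvStepA (primary.getLastD "", primary, pvD1 (pvBestOf (runs ++ [primary])))
      = (((l.foldl pvStepB (runs, primary)).2).getLastD "",
         (l.foldl pvStepB (runs, primary)).2,
         pvD1 (pvBestOf ((l.foldl pvStepB (runs, primary)).1 ++ [(l.foldl pvStepB (runs, primary)).2])))
      ∧ (l.foldl pvStepB (runs, primary)).2 ≠ [] := by
  induction l generalizing primary runs with
  | nil => exact ⟨rfl, hne⟩
  | cons cur t ih =>
    simp only [List.foldl_cons]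
    by_cases hinc : PySem.Str.len cur > PySem.Str.len (primary.getLastD "")
    · -- increasing: both extend the current run
      have hA : pvStepA (primary.getLastD "", primary, pvD1 (pvBestOf (runs ++ [primary]))) cur
          = ((primary ++ [cur]).getLastD "", primary ++ [cur],
             pvD1 (pvBestOf (runs ++ [primary ++ [cur]]))) := by
        have hlast : (primary ++ [cur]).getLastD "" = cur := by simp
        simp only [pvStepA, if_pos hinc, pvD1_size, pvD1_getD, pvD1_insert, hlast]
        rw [pv_best_grow]
        by_cases hc : (pvBestOf (runs ++ [primary])).length < (primary ++ [cur]).length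
        · rw [if_pos hc, if_pos (by exact ⟨Nat.one_pos, hc⟩)]
        · rw [if_neg hc, if_neg (by exact fun h => hc h.2)]
      have hB : pvStepB (runs, primary) cur = (runs, primary ++ [cur]) := by
        simp only [pvStepB, pv_last_get primary hne, if_pos hinc]
      rw [hA, hB]
      exact ih (primary ++ [cur]) runs (by simp)
    · -- run break: B pushes the run; A's saved-seq update is a no-op
      have hA : pvStepA (primary.getLastD "", primary, pvD1 (pvBestOf (runs ++ [primary]))) cur
          = (([cur] : List String).getLastD "", [cur],
             pvD1 (pvBestOf ((runs ++ [primary]) ++ [[cur]]))) := by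
        have hp1 : 1 ≤ primary.length := List.length_pos_iff.mpr hne
        have hge : primary.length ≤ (pvBestOf (runs ++ [primary])).length :=
          pv_best_ge_last runs primary
        have hnotlt : ¬ (pvBestOf (runs ++ [primary])).length < primary.length := by omega
        have hbest : pvBestOf ((runs ++ [primary]) ++ [[cur]]) = pvBestOf (runs ++ [primary]) := by
          rw [pvBestOf_append _ _ (by simp)]
          rw [if_neg (show ¬ ([cur] : List String).length > (pvBestOf (runs ++ [primary])).length by
            simp only [List.length_singleton]; omega)]
        simp only [pvStepA, if_neg hinc, pvD1_size, pvD1_getD, pvD1_insert, hbest]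
        rw [if_neg (by simp), if_neg hnotlt]
        rfl
      have hB : pvStepB (runs, primary) cur = (runs ++ [primary], [cur]) := by
        simp only [pvStepB, pv_last_get primary hne, if_neg hinc]
      rw [hA, hB]
      exact ih [cur] (runs ++ [primary]) (by simp)

-- A's first loop iteration (comparing input[0] with itself) always resets into the dict
theorem pv_first_step (x0 : String) :
    pvStepA (x0, [x0], PySem.Dict.empty) x0 = (x0, [x0], pvD1 [x0]) := by
  have h : ¬ PySem.Str.len x0 > PySem.Str.len x0 := lt_irrefl _
  simp only [pvStepA, if_neg h]
  rfl

-- ===== VERDICT (by name: the statement is the Claim_ definition above) =====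
theorem find_increasing_sub_list_spec : Claim_equal_find_increasing_sub_list := by
  unfold Claim_equal_find_increasing_sub_list
  intro input_data _
  unfold Spec_find_increasing_sub_list
  unfold find_increasing_sub_list find_increasing_sub_list_alt
  by_cases hlen : input_data.length < 2
  · simp [hlen]
  · simp only [if_neg hlen]
    match input_data, hlen with
    | x0 :: rest, hlen =>
      simp only [List.foldl_cons, pv_first_step]
      have hx0 : ([x0] : List String).getLastD "" = x0 := rfl
      have h1 : pvBestOf (([] : List (List String)) ++ [[x0]]) = [x0] := by
        simp [pvBestOf, pvBest]
      have := pv_loop_eq rest [x0] [] (by simp)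
      rw [hx0] at this
      rw [h1] at this
      rw [this.1]
      rcases hB : rest.foldl pvStepB ([], [x0]) with ⟨runs, current⟩
      rw [hB] at this
      simp only
      have hcur : current ≠ [] := this.2
      have hsplit : ∃ b0 rs, runs ++ [current] = b0 :: rs := by
        cases h : runs ++ [current] with
        | nil => exact absurd h (by simp)
        | cons b0 rs => exact ⟨b0, rs, rfl⟩
      rcases hsplit with ⟨b0, rs, hsp⟩
      rw [hsp]
      simp only [pvD1_size, pvD1_getD, pvBestOf]
      simp
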